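-- pv_equiv track=rewrite | github.com/g-will97/Twitter_Data_Reader | proj09.py | get_user_names
-- ===== SOURCE A (Python) =====
-- def get_user_names(L):
--     '''given list of data
--         creates empty set
--         adds user to set
--         returns sorted list of sets'''
--     sett=set() #empty set
--     for line in L: #reads every line in data list
--         user=line[0] #user variable assigned username
--         sett.add(user) #user added to set
--     sett=list(sett) #changes set to list
--     sett=sorted(sett)#sorts list of users
--     return(sett) #returns final set of all suers
-- ===== SOURCE B (Python) =====
-- def get_user_names(L):
--     names = [line[0] for line in L]
--     names.sort()
--     out = []
--     prev = None
--     for u in names: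
--         if u != prev:
--             out.append(u)
--             prev = u
--     return out
-- ===== Notes on version B (the rewrite author's own statement) =====
-- stated objective: alternative
-- what changed: B deduplicates by sorting the full username list (with duplicates) and then removing adjacent duplicates in one linear pass with a prev variable, instead of accumulating a hash set and sorting its elements.
import Mathlib
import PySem

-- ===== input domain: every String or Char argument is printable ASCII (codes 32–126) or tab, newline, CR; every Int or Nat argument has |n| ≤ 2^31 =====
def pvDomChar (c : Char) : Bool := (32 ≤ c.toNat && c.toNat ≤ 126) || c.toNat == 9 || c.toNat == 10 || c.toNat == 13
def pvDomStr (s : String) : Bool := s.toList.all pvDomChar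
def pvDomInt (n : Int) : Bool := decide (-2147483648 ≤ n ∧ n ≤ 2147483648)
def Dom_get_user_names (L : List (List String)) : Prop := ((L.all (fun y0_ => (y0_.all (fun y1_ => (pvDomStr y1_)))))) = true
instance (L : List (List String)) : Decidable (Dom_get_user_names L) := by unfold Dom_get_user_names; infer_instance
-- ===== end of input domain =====

-- B deduplicates by sorting the full username list and dropping adjacent duplicates in one
-- linear pass, instead of accumulating a set and sorting it; same cost, different strategy.

-- ===== PORT A =====
-- for line in L: sett.add(line[0]); then sorted(list(sett)).
-- line[0] is PySem.List.pyGet? line 0 (none = IndexError, excluded by Pre_; the none branch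
-- is only a totality guard).
def get_user_names (L : List (List String)) : List String :=
  let sett := L.foldl (fun s line =>
    match PySem.List.pyGet? line 0 with
    | some user => PySem.Set.add s user
    | none => s) PySem.Set.empty
  PySem.List.sorted sett (fun x => x) false

-- ===== PORT B =====
-- [line[0] for line in L]: headD "" is a totality guard; Pre_ rules empty lines out.
def get_user_names_alt (L : List (List String)) : List String :=
  let names := PySem.List.sorted (L.map (fun line => line.headD "")) (fun x => x) false
  (names.foldl (fun (st : List String × Option String) u =>
      if some u = st.2 then st else (st.1 ++ [u], some u)) ([], none)).1

-- ===== PRECONDITION & SPEC =====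
-- Pre_ excludes exactly the inputs containing an empty inner list, on which A's line[0]
-- raises IndexError (B raises there too).
def Pre_get_user_names (L : List (List String)) : Prop := ∀ line ∈ L, line ≠ []
instance (L : List (List String)) : Decidable (Pre_get_user_names L) := by
  unfold Pre_get_user_names; infer_instance
def pvWitness_get_user_names : List (List String) := [["bob", "x"], ["alice"], ["bob"]]

def Spec_get_user_names (L : List (List String)) (out : List String) : Prop := out = get_user_names_alt L
instance (L : List (List String)) (out : List String) : Decidable (Spec_get_user_names L out) := by unfold Spec_get_user_names; infer_instance

-- ===== CLAIM (what is proved, stated in full; the proofs are below) =====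
def Claim_equal_get_user_names : Prop := ∀ (L : List (List String)), Dom_get_user_names L → Pre_get_user_names L → Spec_get_user_names L (get_user_names L)

-- ===== LEMMAS AND PROOFS =====

-- the adjacent-dedup loop of B, in structural form
def dedupAdj : Option String → List String → List String
  | _, [] => []
  | prev, u :: rest =>
    if some u = prev then dedupAdj prev rest else u :: dedupAdj (some u) rest

theorem foldl_dedupAdj (l : List String) (acc : List String) (prev : Option String) :
    (l.foldl (fun (st : List String × Option String) u =>
      if some u = st.2 then st else (st.1 ++ [u], some u)) (acc, prev)).1
      = acc ++ dedupAdj prev l := by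
  induction l generalizing acc prev with
  | nil => simp [dedupAdj]
  | cons u rest ih =>
    simp only [List.foldl_cons, dedupAdj]
    by_cases h : some u = prev
    · simp [h, ih]
    · simp [h, ih, List.append_assoc]

theorem mem_dedupAdj {x : String} (l : List String) (prev : Option String)
    (hx : x ∈ dedupAdj prev l) : x ∈ l := by
  induction l generalizing prev with
  | nil => simp [dedupAdj] at hx
  | cons u rest ih =>
    simp only [dedupAdj] at hx
    split at hx
    · exact List.mem_cons_of_mem _ (ih _ hx)
    · rcases List.mem_cons.1 hx with h | h
      · simp [h]
      · exact List.mem_cons_of_mem _ (ih _ h)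

theorem mem_dedupAdj_of_mem {x : String} (l : List String) (prev : Option String)
    (hx : x ∈ l) : x ∈ dedupAdj prev l ∨ prev = some x := by
  induction l generalizing prev with
  | nil => simp at hx
  | cons u rest ih =>
    simp only [dedupAdj]
    by_cases h : some u = prev
    · rcases List.mem_cons.1 hx with rfl | hxr
      · simp [h.symm]
      · simpa [h] using ih prev hxr
    · rcases List.mem_cons.1 hx with rfl | hxr
      · simp [h]
      · rcases ih (some u) hxr with hm | hm
        · simp [h, hm]
        · rw [if_neg h]
          left; exact List.mem_cons.2 (Or.inl (Option.some.inj hm).symm)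

theorem dedupAdj_lt_bound (l : List String) :
    ∀ (p : String), l.Pairwise (· ≤ ·) → (∀ y ∈ l, p ≤ y) →
    ∀ y ∈ dedupAdj (some p) l, p < y := by
  induction l with
  | nil => simp [dedupAdj]
  | cons u rest ih =>
    intro p hs hb
    simp only [dedupAdj]
    by_cases h : some u = some p
    · simp only [h]
      exact ih p hs.tail (fun y hy => hb y (List.mem_cons_of_mem _ hy))
    · have hup : p < u :=
        lt_of_le_of_ne (hb u List.mem_cons_self) (fun he => h (by simp [he]))
      simp only [if_neg h]
      intro y hy
      rcases List.mem_cons.1 hy with rfl | hy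
      · exact hup
      · exact lt_trans hup
          (ih u hs.tail (fun y hy => List.rel_of_pairwise_cons hs hy) y hy)

theorem dedupAdj_pairwise (l : List String) (prev : Option String)
    (hs : l.Pairwise (· ≤ ·)) : (dedupAdj prev l).Pairwise (· < ·) := by
  induction l generalizing prev with
  | nil => simp [dedupAdj]
  | cons u rest ih =>
    simp only [dedupAdj]
    by_cases h : some u = prev
    · simpa [h] using ih prev hs.tail
    · simp only [if_neg h]
      exact List.Pairwise.cons
        (dedupAdj_lt_bound rest u hs.tail (fun y hy => List.rel_of_pairwise_cons hs hy))
        (ih (some u) hs.tail)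

theorem foldA_eq_ofList (L : List (List String)) (hP : ∀ line ∈ L, line ≠ []) (s : PySem.Set String) :
    L.foldl (fun s line =>
      match PySem.List.pyGet? line 0 with
      | some user => PySem.Set.add s user
      | none => s) s
    = (L.map (fun line => line.headD "")).foldl PySem.Set.add s := by
  induction L generalizing s with
  | nil => rfl
  | cons line rest ih =>
    have hne := hP line List.mem_cons_self
    match line, hne with
    | u :: t, _ =>
      simp only [List.foldl_cons, List.map_cons]
      rw [ih (fun l hl => hP l (List.mem_cons_of_mem _ hl))]
      simp [PySem.List.pyGet?, PySem.List.pyIdx?]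

-- ===== VERDICT (by name: the statement is the Claim_ definition above) =====
theorem get_user_names_spec : Claim_equal_get_user_names := by
  intro L _ hPre
  unfold Spec_get_user_names get_user_names get_user_names_alt
  simp only []
  set us := L.map (fun line => line.headD "") with hus
  rw [foldA_eq_ofList L hPre]
  rw [foldl_dedupAdj]
  simp only [List.nil_append]
  have hsp : (PySem.List.sorted us (fun x => x) false).Pairwise (· ≤ ·) :=
    PySem.List.sorted_pairwise us (fun x => x)
  have hpw : (dedupAdj none (PySem.List.sorted us (fun x => x) false)).Pairwise (· < ·) :=
    dedupAdj_pairwise _ none hsp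
  have hnd : (dedupAdj none (PySem.List.sorted us (fun x => x) false)).Nodup :=
    hpw.imp (fun h => ne_of_lt h)
  have hperm : (dedupAdj none (PySem.List.sorted us (fun x => x) false)).Perm
      (PySem.Set.ofList us) := by
    rw [List.perm_ext_iff_of_nodup hnd (PySem.Set.nodup_ofList us)]
    intro a
    constructor
    · intro ha
      have := mem_dedupAdj _ _ ha
      rw [PySem.List.mem_sorted] at this
      exact (PySem.Set.mem_ofList us a).2 this
    · intro ha
      have ha' : a ∈ PySem.List.sorted us (fun x => x) false := by
        rw [PySem.List.mem_sorted]
        exact (PySem.Set.mem_ofList us a).1 ha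
      rcases mem_dedupAdj_of_mem _ none ha' with hm | hm
      · exact hm
      · exact absurd hm (by simp)
  rw [show (PySem.Set.empty : PySem.Set String) = [] from rfl, ← PySem.Set.ofList_eq_foldl]
  exact PySem.List.sorted_eq_of_perm_of_pairwise_lt _ _ _ hperm hpw
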